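-- pv_equiv track=rewrite | github.com/UlisesMisko/TPO-PROGRA1 | TP0 (1).py | max_dif
-- ===== SOURCE A (Python) =====
-- def max_dif(resultados_por_equipo):
-- # Muestra el/los equipo/s con la mayor/es diferencia de gol/es en un partido.
--     max_dif_equipo, max_dif = [], 0
--
--     for equipo, resultados in resultados_por_equipo.items():
--         for fecha, dif in resultados.items():
--             if dif > max_dif:
--                 max_dif = dif
--                 max_dif_equipo = [equipo]                            #Cada vez que encuentre un equipo con la mayor cantidad de goles, la lista max_dif_equipo
--             elif dif == max_dif and equipo not in max_dif_equipo:     #se reinicia y se guarda solo con el elemento que cumplio las condiciones."""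
--                 max_dif_equipo.append(equipo)
--
--     return max_dif_equipo, max_dif
-- ===== SOURCE B (Python) =====
-- def max_dif(resultados_por_equipo):
--     # Two separate passes: first find the maximum difference (anchored at 0),
--     # then select the teams that reach it.
--     m = 0
--     for resultados in resultados_por_equipo.values():
--         for dif in resultados.values():
--             if dif > m:
--                 m = dif
--     equipos = [equipo for equipo, resultados in resultados_por_equipo.items()
--                if any(dif == m for dif in resultados.values())]
--     return equipos, m
-- ===== Notes on version B (the rewrite author's own statement) =====
-- stated objective: faster
-- what changed: Replaces A's single interleaved loop, which maintains and resets the winner list and does an 'equipo not in max_dif_equipo' list-membership scan per entry, with two separate passes: one pass computes the maximum difference (anchored at 0), then a comprehension selects every team having a difference equal to it.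
import Mathlib
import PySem

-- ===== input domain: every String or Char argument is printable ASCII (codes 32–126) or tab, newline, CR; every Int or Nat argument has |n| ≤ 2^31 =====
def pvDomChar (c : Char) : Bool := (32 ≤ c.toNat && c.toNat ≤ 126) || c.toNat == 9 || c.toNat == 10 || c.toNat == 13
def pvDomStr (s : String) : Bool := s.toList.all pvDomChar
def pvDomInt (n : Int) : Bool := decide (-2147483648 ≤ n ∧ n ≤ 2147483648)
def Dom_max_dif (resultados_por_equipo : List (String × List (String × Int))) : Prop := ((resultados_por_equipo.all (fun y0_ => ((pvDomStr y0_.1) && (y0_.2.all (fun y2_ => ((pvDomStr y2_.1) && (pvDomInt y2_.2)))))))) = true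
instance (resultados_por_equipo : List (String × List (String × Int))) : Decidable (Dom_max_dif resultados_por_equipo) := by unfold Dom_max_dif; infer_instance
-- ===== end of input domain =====

-- B separates the two concerns A interleaves: one pass computes the maximum
-- difference (anchored at 0), then a comprehension selects the teams reaching it,
-- dropping A's per-entry membership scan of the winners list (objective: faster,
-- measured).

-- ===== PORT A =====
-- A-side helper: the body of A's inner loop (one (fecha, dif) step).
def pvStepA (equipo : String) (st : List String × Int) (p : String × Int) : List String × Int :=
  if p.2 > st.2 then ([equipo], p.2)
  else if (p.2 == st.2) && !(st.1.contains equipo) then (st.1 ++ [equipo], st.2)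
  else st

-- A-side helper: A's inner loop over one team's resultados dict.
def pvInnerA (st : List String × Int) (pr : String × List (String × Int)) : List String × Int :=
  pr.2.foldl (pvStepA pr.1) st

def max_dif (resultados_por_equipo : List (String × List (String × Int))) : List String × Int :=
  resultados_por_equipo.foldl pvInnerA ([], 0)

-- ===== PORT B =====
-- B-side helper: the body of B's first loop (raise m on one dif).
def pvMaxStep (m : Int) (p : String × Int) : Int := if p.2 > m then p.2 else m

-- B-side helper: B's first loop over one team's resultados dict.
def pvMaxInner (m : Int) (pr : String × List (String × Int)) : Int := pr.2.foldl pvMaxStep m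

def max_dif_alt (resultados_por_equipo : List (String × List (String × Int))) : List String × Int :=
  let M := resultados_por_equipo.foldl pvMaxInner 0
  ((resultados_por_equipo.filter (fun pr => pr.2.any (fun p => p.2 == M))).map Prod.fst, M)

-- ===== PRECONDITION & SPEC =====
-- Pre_ excludes association lists whose outer team names repeat: in Python the
-- argument is a dict, which cannot hold duplicate keys, so these inputs do not
-- correspond to any Python call (on them A's membership check would suppress the
-- duplicate while B's comprehension would list it twice).
def Pre_max_dif (resultados_por_equipo : List (String × List (String × Int))) : Prop :=
  (resultados_por_equipo.map Prod.fst).Nodup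
instance (resultados_por_equipo : List (String × List (String × Int))) : Decidable (Pre_max_dif resultados_por_equipo) := by unfold Pre_max_dif; infer_instance

def pvWitness_max_dif : (List (String × List (String × Int))) :=
  [("boca", [("f1", 2), ("f2", -1)]), ("river", [("f1", 2)])]

def Spec_max_dif (resultados_por_equipo : List (String × List (String × Int))) (out : List String × Int) : Prop := out = max_dif_alt resultados_por_equipo
instance (resultados_por_equipo : List (String × List (String × Int))) (out : List String × Int) : Decidable (Spec_max_dif resultados_por_equipo out) := by unfold Spec_max_dif; infer_instance

-- ===== CLAIM (what is proved, stated in full; the proofs are below) =====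
def Claim_equal_max_dif : Prop := ∀ (resultados_por_equipo : List (String × List (String × Int))), Dom_max_dif resultados_por_equipo → Pre_max_dif resultados_por_equipo → Spec_max_dif resultados_por_equipo (max_dif resultados_por_equipo)

-- ===== LEMMAS AND PROOFS =====

-- facts about B's max fold over one team's list
theorem maxfold_le (ds : List (String × Int)) (m : Int) : m ≤ ds.foldl pvMaxStep m := by
  induction ds generalizing m with
  | nil => simp
  | cons p rest ih =>
      simp only [List.foldl_cons]
      refine le_trans ?_ (ih (pvMaxStep m p))
      unfold pvMaxStep; split <;> omega

theorem maxfold_mem_le (ds : List (String × Int)) (m : Int) (p : String × Int) (hp : p ∈ ds) :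
    p.2 ≤ ds.foldl pvMaxStep m := by
  induction ds generalizing m with
  | nil => cases hp
  | cons q rest ih =>
      simp only [List.foldl_cons]
      rcases List.mem_cons.1 hp with h | h
      · subst h
        refine le_trans ?_ (maxfold_le rest (pvMaxStep m p))
        unfold pvMaxStep; split <;> omega
      · exact ih _ h

theorem maxfold_of_no_gt (ds : List (String × Int)) (m : Int)
    (h : ∀ p ∈ ds, p.2 ≤ m) : ds.foldl pvMaxStep m = m := by
  induction ds with
  | nil => simp
  | cons p rest ih =>
      have h1 := h p (List.mem_cons_self)
      simp only [List.foldl_cons]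
      have : pvMaxStep m p = m := by unfold pvMaxStep; split <;> omega
      rw [this]
      exact ih (fun q hq => h q (List.mem_cons_of_mem _ hq))

theorem maxfold_attained (ds : List (String × Int)) (m : Int)
    (h : ∃ p ∈ ds, m < p.2) : ∃ p ∈ ds, p.2 = ds.foldl pvMaxStep m := by
  induction ds generalizing m with
  | nil => simp at h
  | cons q rest ih =>
      simp only [List.foldl_cons]
      by_cases hrest : ∃ p ∈ rest, pvMaxStep m q < p.2
      · obtain ⟨p, hp, hpe⟩ := ih (pvMaxStep m q) hrest
        exact ⟨p, List.mem_cons_of_mem _ hp, hpe⟩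
      · push_neg at hrest
        have hfix : rest.foldl pvMaxStep (pvMaxStep m q) = pvMaxStep m q :=
          maxfold_of_no_gt _ _ hrest
        rw [hfix]
        by_cases hq : m < q.2
        · refine ⟨q, List.mem_cons_self, ?_⟩
          unfold pvMaxStep; split <;> omega
        · obtain ⟨p, hp, hpl⟩ := h
          rcases List.mem_cons.1 hp with h' | h'
          · subst h'; omega
          · refine ⟨p, List.mem_cons_of_mem _ h', ?_⟩
            have := hrest p h'
            have hms : pvMaxStep m q = m := by unfold pvMaxStep; split <;> omega
            rw [hms] at this ⊢
            omega

theorem maxfold_gt (ds : List (String × Int)) (m : Int)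
    (h : ∃ p ∈ ds, m < p.2) : m < ds.foldl pvMaxStep m := by
  obtain ⟨p, hp, hpl⟩ := h
  exact lt_of_lt_of_le hpl (maxfold_mem_le ds m p hp)

-- facts about B's outer max fold
theorem outer_le (r : List (String × List (String × Int))) (m : Int) :
    m ≤ r.foldl pvMaxInner m := by
  induction r generalizing m with
  | nil => simp
  | cons pr rest ih =>
      simp only [List.foldl_cons]
      exact le_trans (maxfold_le pr.2 m) (ih _)

theorem dif_le_outer (r : List (String × List (String × Int))) (m : Int)
    (pr : String × List (String × Int)) (p : String × Int)
    (h1 : pr ∈ r) (h2 : p ∈ pr.2) : p.2 ≤ r.foldl pvMaxInner m := by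
  induction r generalizing m with
  | nil => cases h1
  | cons q rest ih =>
      simp only [List.foldl_cons]
      rcases List.mem_cons.1 h1 with h | h
      · subst h
        exact le_trans (maxfold_mem_le pr.2 m p h2) (outer_le rest _)
      · exact ih _ h

-- A's inner loop once the team is already in the list
theorem innerA_self (e : String) (ds : List (String × Int)) (m : Int) :
    ds.foldl (pvStepA e) ([e], m) = ([e], ds.foldl pvMaxStep m) := by
  induction ds generalizing m with
  | nil => simp
  | cons p rest ih =>
      simp only [List.foldl_cons]
      by_cases h : p.2 > m
      · have h1 : pvStepA e ([e], m) p = ([e], p.2) := by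
          unfold pvStepA; simp [h]
        have h2 : pvMaxStep m p = p.2 := by unfold pvMaxStep; simp [h]
        rw [h1, h2, ih]
      · have h1 : pvStepA e ([e], m) p = ([e], m) := by
          unfold pvStepA; simp [h]
        have h2 : pvMaxStep m p = m := by unfold pvMaxStep; simp [h]
        rw [h1, h2, ih]

theorem innerA_in (e : String) (ds : List (String × Int)) (L : List String) (m : Int)
    (hL : L.contains e = true) :
    ds.foldl (pvStepA e) (L, m) =
      if ds.any (fun p => decide (m < p.2)) then ([e], ds.foldl pvMaxStep m) else (L, m) := by
  induction ds with
  | nil => simp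
  | cons p rest ih =>
      simp only [List.foldl_cons]
      by_cases h : m < p.2
      · have h1 : pvStepA e (L, m) p = ([e], p.2) := by
          unfold pvStepA; simp [h]
        have h2 : pvMaxStep m p = p.2 := by unfold pvMaxStep; simp [h]
        rw [h1, h2, innerA_self]
        have hc : ((p :: rest).any fun p => decide (m < p.2)) = true := by
          simp [h]
        rw [if_pos hc]
      · have h1 : pvStepA e (L, m) p = (L, m) := by
          unfold pvStepA
          rw [if_neg h]
          have hc : ((p.2 == m) && !L.contains e) = false := by
            rw [hL]; simp
          rw [hc]
          simp
        have h2 : pvMaxStep m p = m := by unfold pvMaxStep; simp [h]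
        rw [h1, h2, ih]
        refine if_congr ?_ rfl rfl
        simp [h]

theorem innerA_main (e : String) (ds : List (String × Int)) (L : List String) (m : Int)
    (he : L.contains e = false) :
    ds.foldl (pvStepA e) (L, m) =
      if ds.any (fun p => decide (m < p.2)) then ([e], ds.foldl pvMaxStep m)
      else if ds.any (fun p => p.2 == m) then (L ++ [e], m) else (L, m) := by
  induction ds with
  | nil => simp
  | cons p rest ih =>
      simp only [List.foldl_cons]
      by_cases h : m < p.2
      · have h1 : pvStepA e (L, m) p = ([e], p.2) := by
          unfold pvStepA; simp [h]
        have h2 : pvMaxStep m p = p.2 := by unfold pvMaxStep; simp [h]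
        rw [h1, h2, innerA_self]
        have hc : ((p :: rest).any fun p => decide (m < p.2)) = true := by
          simp [h]
        rw [if_pos hc]
      · have h2 : pvMaxStep m p = m := by unfold pvMaxStep; simp [h]
        by_cases heq : p.2 = m
        · have h1 : pvStepA e (L, m) p = (L ++ [e], m) := by
            unfold pvStepA
            rw [if_neg h]
            have hc : ((p.2 == m) && !L.contains e) = true := by
              rw [he, heq]; simp
            rw [hc]
            simp
          have hc2 : (L ++ [e]).contains e = true := by simp
          rw [h1, innerA_in e rest (L ++ [e]) m hc2, h2]
          refine if_congr (by simp [h]) rfl ?_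
          have hq : ((p :: rest).any fun p => p.2 == m) = true := by
            simp [heq]
          rw [if_pos hq]
        · have h1 : pvStepA e (L, m) p = (L, m) := by
            unfold pvStepA
            rw [if_neg h]
            have hc : ((p.2 == m) && !L.contains e) = false := by
              have hb : (p.2 == m) = false := by simp [heq]
              rw [hb]; simp
            rw [hc]
            simp
          rw [h1, h2, ih]
          refine if_congr (by simp [h]) rfl (if_congr (by simp [heq]) rfl rfl)

-- the main invariant: A's fold computes B's (selected teams, maximum) pair
theorem main_inv (r : List (String × List (String × Int)))
    (h : (r.map Prod.fst).Nodup) :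
    r.foldl pvInnerA ([], 0) =
      ((r.filter (fun pr => pr.2.any (fun p => p.2 == r.foldl pvMaxInner 0))).map Prod.fst,
        r.foldl pvMaxInner 0) := by
  induction r using List.reverseRecOn with
  | nil => simp
  | append_singleton r x ih =>
      have hmap : ((r ++ [x]).map Prod.fst) = r.map Prod.fst ++ [x.1] := by rw [List.map_append, List.map_cons, List.map_nil]
      rw [hmap] at h
      have hr : (r.map Prod.fst).Nodup := (List.nodup_append.1 h).1
      have hx : x.1 ∉ r.map Prod.fst := by
        have := (List.nodup_append.1 h).2.2
        intro hmem
        exact (this x.1 hmem x.1 List.mem_cons_self) rfl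
      set M := r.foldl pvMaxInner 0 with hM
      set L := (r.filter (fun pr => pr.2.any (fun p => p.2 == M))).map Prod.fst with hL
      have hLc : L.contains x.1 = false := by
        rw [List.contains_eq_mem]
        simp only [decide_eq_false_iff_not]
        intro hmem
        apply hx
        rw [hL] at hmem
        obtain ⟨pr, hpr, hpe⟩ := List.mem_map.1 hmem
        exact List.mem_map.2 ⟨pr, List.mem_of_mem_filter hpr, hpe⟩
      have hfoldA : (r ++ [x]).foldl pvInnerA ([], 0) =
          x.2.foldl (pvStepA x.1) (L, M) := by
        rw [List.foldl_append, ih hr]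
        rfl
      have hM' : (r ++ [x]).foldl pvMaxInner 0 = x.2.foldl pvMaxStep M := by
        rw [List.foldl_append]; rfl
      rw [hfoldA, innerA_main x.1 x.2 L M hLc, hM']
      by_cases hgt : ∃ p ∈ x.2, M < p.2
      · have hany : x.2.any (fun p => decide (M < p.2)) = true := by
          simp only [List.any_eq_true, decide_eq_true_eq]; exact hgt
        rw [if_pos hany]
        set M' := x.2.foldl pvMaxStep M with hM'def
        have hMlt : M < M' := maxfold_gt x.2 M hgt
        have hfilter : (r ++ [x]).filter (fun pr => pr.2.any (fun p => p.2 == M')) = [x] := by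
          rw [List.filter_append]
          have h1 : r.filter (fun pr => pr.2.any (fun p => p.2 == M')) = [] := by
            rw [List.filter_eq_nil_iff]
            intro pr hpr
            simp only [List.any_eq_true, beq_iff_eq, not_exists, not_and]
            intro p hp
            have := dif_le_outer r 0 pr p hpr hp
            rw [← hM] at this
            omega
          have h2 : x.2.any (fun p => p.2 == M') = true := by
            obtain ⟨p, hp, hpe⟩ := maxfold_attained x.2 M hgt
            simp only [List.any_eq_true, beq_iff_eq]
            exact ⟨p, hp, hpe⟩
          rw [h1, List.filter_singleton, h2]
          rfl
        rw [hfilter]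
        simp
      · push_neg at hgt
        have hany : x.2.any (fun p => decide (M < p.2)) = false := by
          simp only [List.any_eq_false, decide_eq_true_eq]
          intro p hp; exact not_lt.2 (hgt p hp)
        rw [if_neg (by simp [hany])]
        have hMeq : x.2.foldl pvMaxStep M = M := maxfold_of_no_gt x.2 M hgt
        rw [hMeq]
        rw [List.filter_append, List.filter_singleton, List.map_append]
        by_cases hq : x.2.any (fun p => p.2 == M) = true
        · rw [if_pos hq, hq]
          simp [hL]
        · rw [if_neg hq]
          simp only [Bool.not_eq_true] at hq
          rw [hq]
          simp [hL]

-- ===== VERDICT (by name: the statement is the Claim_ definition above) =====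
theorem max_dif_spec : Claim_equal_max_dif := by
  intro r _ hpre
  unfold Spec_max_dif max_dif max_dif_alt
  exact main_inv r hpre
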